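-- pv_equiv track=rewrite | github.com/pypi-data/pypi-mirror-403 | packages/tellaro-query-language/tellaro_query_language-0.2.16.tar.gz/tellaro_query_language-0.2.16/src/tql/opensearch_components/lucene_converter.py | _escape_lucene_value
-- ===== SOURCE A (Python) =====
-- def _escape_lucene_value(value: str) -> str:
--     """Escape special characters in Lucene query values."""
--     # Lucene special characters: + - = && || > < ! ( ) { } [ ] ^ " ~ * ? : \ /
--     special_chars = [
--         "+",
--         "-",
--         "=",
--         "&",
--         "|",
--         ">",
--         "<",
--         "!",
--         "(",
--         ")",
--         "{",
--         "}",
--         "[",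
--         "]",
--         "^",
--         '"',
--         "~",
--         "*",
--         "?",
--         ":",
--         "\\",
--         "/",
--     ]
--
--     escaped = value
--     for char in special_chars:
--         escaped = escaped.replace(char, f"\\{char}")
--
--     # Quote the value if it contains spaces
--     if " " in escaped:
--         escaped = f'"{escaped}"'
--
--     return escaped
-- ===== SOURCE B (Python) =====
-- _LUCENE_TABLE = str.maketrans(
--     {c: "\\\\" + c for c in '+-=&|><!(){}[]^"~*?:'} | {"\\": "\\\\", "/": "\\/"}
-- )
--
--
-- def _escape_lucene_value(value: str) -> str:
--     """Escape special characters in Lucene query values."""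
--     escaped = value.translate(_LUCENE_TABLE)
--     return f'"{escaped}"' if " " in escaped else escaped
-- ===== Notes on version B (the rewrite author's own statement) =====
-- stated objective: idiomatic
-- what changed: Replaces A's 22 sequential full-string str.replace passes with a single precomputed str.maketrans translation table applied in one str.translate pass (two backslashes for the pre-backslash specials and for backslash itself, one for '/'), keeping the quote-if-space step.
import Mathlib
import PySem

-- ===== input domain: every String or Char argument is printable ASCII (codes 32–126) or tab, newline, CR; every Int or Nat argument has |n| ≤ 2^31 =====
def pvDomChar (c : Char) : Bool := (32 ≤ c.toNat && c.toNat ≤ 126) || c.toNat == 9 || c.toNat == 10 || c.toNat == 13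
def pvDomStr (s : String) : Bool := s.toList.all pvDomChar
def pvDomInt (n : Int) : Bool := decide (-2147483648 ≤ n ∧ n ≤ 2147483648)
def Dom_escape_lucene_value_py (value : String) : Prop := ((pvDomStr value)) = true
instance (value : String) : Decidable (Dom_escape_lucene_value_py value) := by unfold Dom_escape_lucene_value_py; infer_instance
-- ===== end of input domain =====

-- B replaces A's 22 sequential str.replace passes by one precomputed per-character
-- translation table applied in a single pass (idiomatic str.translate); same result.

-- ===== PORT A =====
def luceneSpecials : List String :=
  ["+", "-", "=", "&", "|", ">", "<", "!", "(", ")", "{", "}", "[", "]", "^",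
   "\"", "~", "*", "?", ":", "\\", "/"]

def escape_lucene_value_py (value : String) : String :=
  let escaped := luceneSpecials.foldl
    (fun s ch => PySem.Str.replace s ch ("\\" ++ ch)) value
  if PySem.Str.isIn " " escaped then "\"" ++ escaped ++ "\"" else escaped

-- ===== PORT B =====
-- the translation table built once by Source B: each special maps to its escape sequence
def luceneEsc (c : Char) : List Char :=
  if c = '\\' then ['\\', '\\']
  else if c = '/' then ['\\', '/']
  else if ("+-=&|><!(){}[]^\"~*?:").toList.contains c then ['\\', '\\', c]
  else [c]

def escape_lucene_value_py_alt (value : String) : String :=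
  let escaped := String.ofList (value.toList.flatMap luceneEsc)
  if PySem.Str.isIn " " escaped then "\"" ++ escaped ++ "\"" else escaped

-- ===== PRECONDITION & SPEC =====
def Spec_escape_lucene_value_py (value : String) (out : String) : Prop := out = escape_lucene_value_py_alt value
instance (value : String) (out : String) : Decidable (Spec_escape_lucene_value_py value out) := by unfold Spec_escape_lucene_value_py; infer_instance

-- ===== CLAIM (what is proved, stated in full; the proofs are below) =====
def Claim_equal_escape_lucene_value_py : Prop := ∀ (value : String), Dom_escape_lucene_value_py value → Spec_escape_lucene_value_py value (escape_lucene_value_py value)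

-- ===== LEMMAS AND PROOFS =====

-- one replace pass with a single-char pattern acts independently on each character
def stepc (l : List Char) (c : Char) : List Char :=
  l.flatMap (fun x => if x = c then ['\\', c] else [x])

theorem go_single (c : Char) (new : List Char) :
    ∀ (s acc : List Char), PySem.Chars.replace.go [c] new s.length s acc
      = acc.reverse ++ s.flatMap (fun x => if x = c then new else [x]) := by
  intro s
  induction s with
  | nil => intro acc; simp [PySem.Chars.replace.go]
  | cons x t ih =>
    intro acc
    simp only [List.length_cons, PySem.Chars.replace.go, List.isPrefixOf]
    by_cases h : x = c
    · subst h
      simp [ih, List.flatMap_cons]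
    · simp [h, Ne.symm h, ih, List.flatMap_cons]

theorem replace_single (s : List Char) (c : Char) (new : List Char) :
    PySem.Chars.replace s [c] new = s.flatMap (fun x => if x = c then new else [x]) := by
  simp [PySem.Chars.replace, go_single]

-- the character-level list of A's special strings
def luceneChars : List Char :=
  ['+', '-', '=', '&', '|', '>', '<', '!', '(', ')', '{', '}', '[', ']', '^',
   '"', '~', '*', '?', ':', '\\', '/']

theorem luceneSpecials_eq_map :
    luceneSpecials = luceneChars.map (fun c => String.ofList [c]) := by decide

-- A's fold over the special STRINGS, seen on the character lists
theorem fold_strings (cs : List Char) :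
    ∀ (v : String),
      ((cs.foldl
          (fun s c => PySem.Str.replace s (String.ofList [c]) ("\\" ++ String.ofList [c])) v)).toList
        = cs.foldl stepc v.toList := by
  induction cs with
  | nil => intro v; simp
  | cons c t ih =>
    intro v
    have h1 : (PySem.Str.replace v (String.ofList [c]) ("\\" ++ String.ofList [c])).toList
        = stepc v.toList c := by
      rw [PySem.Str.toList_replace]
      have hp : (String.ofList [c]).toList = [c] := String.toList_ofList
      have hr : ("\\" ++ String.ofList [c]).toList = ['\\', c] := by
        simp [String.toList_append]
      rw [hp, hr, replace_single, stepc]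
    simp only [List.foldl_cons, ih, h1]

-- a fold of per-character maps is itself a per-character map
theorem fold_flatMap (cs : List Char) :
    ∀ (l : List Char), cs.foldl stepc l = l.flatMap (fun x => cs.foldl stepc [x]) := by
  induction cs with
  | nil => intro l; simp
  | cons c t ih =>
    intro l
    simp only [List.foldl_cons]
    rw [ih (stepc l c)]
    show (stepc l c).flatMap _ = l.flatMap _
    rw [stepc, List.flatMap_assoc]
    congr 1
    funext x
    rw [ih (stepc [x] c)]
    by_cases h : x = c <;> simp [stepc, h]

theorem fold_nonmem (x : Char) :
    ∀ (cs : List Char), x ∉ cs → cs.foldl stepc [x] = [x] := by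
  intro cs
  induction cs with
  | nil => intro _; rfl
  | cons c t ih =>
    intro h
    simp only [List.mem_cons, not_or] at h
    have hs : stepc [x] c = [x] := by simp [stepc, h.1]
    simp only [List.foldl_cons, hs]
    exact ih h.2

-- A's composite per-character action is exactly B's table
set_option maxRecDepth 8192 in
set_option maxHeartbeats 2000000 in
theorem action_eq (x : Char) : luceneChars.foldl stepc [x] = luceneEsc x := by
  by_cases h : x ∈ luceneChars
  · fin_cases h <;> decide
  · rw [fold_nonmem x luceneChars h]
    simp only [luceneChars, List.mem_cons, not_or] at h
    obtain ⟨h1, h2, h3, h4, h5, h6, h7, h8, h9, h10, h11, h12, h13, h14, h15,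
      h16, h17, h18, h19, h20, h21, h22, -⟩ := h
    have ht : ("+-=&|><!(){}[]^\"~*?:").toList
        = ['+', '-', '=', '&', '|', '>', '<', '!', '(', ')', '{', '}', '[', ']',
           '^', '"', '~', '*', '?', ':'] := rfl
    simp [luceneEsc, ht, h1, h2, h3, h4, h5, h6, h7, h8, h9, h10, h11, h12,
      h13, h14, h15, h16, h17, h18, h19, h20, h21, h22]

set_option maxHeartbeats 2000000 in
theorem escaped_toList (value : String) :
    (luceneSpecials.foldl (fun s ch => PySem.Str.replace s ch ("\\" ++ ch)) value).toList
      = value.toList.flatMap luceneEsc := by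
  rw [luceneSpecials_eq_map, List.foldl_map]
  rw [fold_strings]
  rw [fold_flatMap]
  rw [show (fun x => luceneChars.foldl stepc [x]) = luceneEsc from funext action_eq]

-- ===== VERDICT (by name: the statement is the Claim_ definition above) =====
theorem escape_lucene_value_py_spec : Claim_equal_escape_lucene_value_py := by
  intro value _
  show escape_lucene_value_py value = escape_lucene_value_py_alt value
  unfold escape_lucene_value_py escape_lucene_value_py_alt
  have he : (luceneSpecials.foldl (fun s ch => PySem.Str.replace s ch ("\\" ++ ch)) value)
      = String.ofList (value.toList.flatMap luceneEsc) := by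
    apply String.ext
    rw [String.toList_ofList]
    exact escaped_toList value
  simp only [he]
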